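-- pv_equiv track=rewrite | github.com/tneuqole/advent-of-code | 2019/day4.py | check
-- ===== SOURCE A (Python) =====
-- import itertools
--
-- def check(num, p2=False):
--     if len(set(num)) == len(num):
--         return 0
--
--     for i in range(len(num) - 1):
--         if int(num[i + 1]) - int(num[i]) < 0:
--             return 0
--
--     if p2:
--         return 1 if 2 in [len(list(g)) for _, g in itertools.groupby(num)] else 0
--
--     return 1
-- ===== SOURCE B (Python) =====
-- def check(num, p2=False):
--     if len(set(num)) == len(num):
--         return 0
--     run = 1
--     has_pair = False
--     for i in range(1, len(num)):
--         if int(num[i]) < int(num[i - 1]):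
--             return 0
--         if num[i] == num[i - 1]:
--             run += 1
--         else:
--             if run == 2:
--                 has_pair = True
--             run = 1
--     if run == 2:
--         has_pair = True
--     if p2:
--         return 1 if has_pair else 0
--     return 1
-- ===== Notes on version B (the rewrite author's own statement) =====
-- stated objective: alternative
-- what changed: A's separate decreasing-scan pass and itertools.groupby run-length pass are fused into one index loop that maintains a current run length and a has_pair flag, deciding on the fly whether some run has length exactly 2.
-- outside the precondition, e.g. on check('10zz', False): A returns 0, B returns 0
import Mathlib
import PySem

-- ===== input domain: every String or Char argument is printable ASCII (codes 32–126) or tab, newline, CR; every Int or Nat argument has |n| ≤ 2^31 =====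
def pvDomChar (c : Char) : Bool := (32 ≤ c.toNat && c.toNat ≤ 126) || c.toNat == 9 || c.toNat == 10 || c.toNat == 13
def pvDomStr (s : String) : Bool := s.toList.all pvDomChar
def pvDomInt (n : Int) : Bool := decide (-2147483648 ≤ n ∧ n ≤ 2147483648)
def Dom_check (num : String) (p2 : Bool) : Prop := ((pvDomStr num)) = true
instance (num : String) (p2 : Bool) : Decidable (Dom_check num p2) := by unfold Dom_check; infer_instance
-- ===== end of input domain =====

-- B fuses A's two passes (decreasing scan + itertools.groupby run lengths) into one
-- loop that tracks the current run length; alternative decomposition, same cost.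

-- ===== PORT A =====
-- int(num[i]) on a single character; .getD 0 is only reached outside Pre_check (Python raises there)
def pyIntChar (c : Char) : Int := (PySem.Int.ofStr? (String.ofList [c])).getD 0

-- the 'for i in range(len(num)-1)' decreasing scan, as structural recursion on adjacent pairs
def checkDec : List Char → Bool
  | c :: d :: rest => if pyIntChar d - pyIntChar c < 0 then true else checkDec (d :: rest)
  | _ => false

-- [len(list(g)) for _, g in itertools.groupby(num)]
def groupGo (c : Char) (n : Nat) : List Char → List Nat
  | [] => [n]
  | d :: rest => if d = c then groupGo c (n + 1) rest else n :: groupGo d 1 rest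

def runLengths : List Char → List Nat
  | [] => []
  | c :: rest => groupGo c 1 rest

def check (num : String) (p2 : Bool) : Int :=
  let cs := num.toList
  if (PySem.Set.ofList cs).length = cs.length then 0
  else if checkDec cs then 0
  else if p2 then (if 2 ∈ runLengths cs then 1 else 0)
  else 1

-- ===== PORT B =====
-- the single fused loop of Source B: state (prev char, current run length, has_pair);
-- none = the early 'return 0' on a decrease
def checkLoopB (prev : Char) (run : Nat) (hp : Bool) : List Char → Option Bool
  | [] => some (hp || run == 2)
  | d :: rest =>
    if pyIntChar d < pyIntChar prev then none
    else if d = prev then checkLoopB d (run + 1) hp rest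
    else checkLoopB d 1 (hp || run == 2) rest

def check_alt (num : String) (p2 : Bool) : Int :=
  let cs := num.toList
  if (PySem.Set.ofList cs).length = cs.length then 0
  else
    match cs with
    | [] => if p2 then 0 else 1   -- loop body never runs; unreachable after the distinct check
    | c :: rest =>
      match checkLoopB c 1 false rest with
      | none => 0
      | some hp => if p2 then (if hp then 1 else 0) else 1

-- ===== PRECONDITION & SPEC =====
-- Pre_ excludes strings with a duplicate character that are not all digits: there int()
-- generally raises ValueError in both programs (a few such strings still return 0 in both,
-- when a decrease among digit chars is found before the first non-digit char; they are
-- excluded to keep Pre_ closed-form).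
def Pre_check (num : String) (p2 : Bool) : Prop :=
  num.toList.Nodup ∨ num.toList.all (fun c => c.isDigit) = true
instance (num : String) (p2 : Bool) : Decidable (Pre_check num p2) := by
  unfold Pre_check; infer_instance

def pvWitness_check : String × Bool := ("111123", true)

def Spec_check (num : String) (p2 : Bool) (out : Int) : Prop := out = check_alt num p2
instance (num : String) (p2 : Bool) (out : Int) : Decidable (Spec_check num p2 out) := by
  unfold Spec_check; infer_instance

-- ===== CLAIM =====
def Claim_equal_check : Prop :=
  ∀ (num : String) (p2 : Bool), Dom_check num p2 → Pre_check num p2 →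
    Spec_check num p2 (check num p2)

-- ===== LEMMAS AND PROOFS =====
lemma checkLoopB_eq (rest : List Char) : ∀ (c : Char) (run : Nat) (hp : Bool),
    checkLoopB c run hp rest =
      if checkDec (c :: rest) then none
      else some (hp || decide (2 ∈ groupGo c run rest)) := by
  induction rest with
  | nil =>
    intro c run hp
    simp [checkLoopB, checkDec, groupGo, beq_eq_decide, eq_comm]
  | cons d rs ih =>
    intro c run hp
    simp only [checkLoopB, checkDec, groupGo]
    by_cases hlt : pyIntChar d < pyIntChar c
    · have : pyIntChar d - pyIntChar c < 0 := by omega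
      simp [hlt, this]
    · have hsub : ¬ pyIntChar d - pyIntChar c < 0 := by omega
      by_cases heq : d = c
      · subst heq
        simp [hlt, hsub, ih]
      · simp only [hlt, hsub, heq, if_false, if_true, ite_false]
        rw [ih]
        by_cases hdec : checkDec (d :: rs)
        · simp [hdec]
        · simp [hdec, Bool.or_assoc, beq_eq_decide, eq_comm]

theorem check_eq_alt (num : String) (p2 : Bool) : check num p2 = check_alt num p2 := by
  unfold check check_alt
  by_cases hset : (PySem.Set.ofList num.toList).length = num.toList.length
  · simp [hset]
  · simp only [hset, if_false]
    cases h : num.toList with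
    | nil => simp [checkDec, runLengths]
    | cons c rest =>
      simp only [checkLoopB_eq]
      by_cases hdec : checkDec (c :: rest)
      · simp [hdec]
      · by_cases hm : 2 ∈ groupGo c 1 rest <;> simp [hdec, runLengths, hm]

-- ===== VERDICT =====
theorem check_spec : Claim_equal_check := by
  intro num p2 _ _
  unfold Spec_check
  exact check_eq_alt num p2
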